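-- pv_equiv track=rewrite | github.com/LAHBIBMedAMINE/pythonChallenge | puzzle9.py | firsttLine
-- ===== SOURCE A (Python) =====
-- def soustractlevel(mylist):
--     newlist = []
--     for i in range(len(mylist) - 1):
--         newlist.append(mylist[i + 1] - mylist[i])
--     return newlist
--
-- def firsttLine(line):
--     lastline = []
--     lastline.append(line[0])
--     nextlevel = line
--
--     while not all(element == 0 for element in nextlevel):
--         nextlevel = soustractlevel(nextlevel)
--         lastline.append(nextlevel[0])
--     lastline.reverse()
--     return lastline
-- ===== SOURCE B (Python) =====
-- def soustractlevel(mylist):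
--     return [b - a for a, b in zip(mylist, mylist[1:])]
--
-- def firsttLine(line):
--     if all(e == 0 for e in line):
--         return [line[0]]
--     return firsttLine(soustractlevel(line)) + [line[0]]
-- ===== Notes on version B (the rewrite author's own statement) =====
-- stated objective: alternative
-- what changed: Replaces the imperative while-loop that accumulates heads forward and then reverses with a direct recursion on the difference list that builds the answer already reversed (and a zip comprehension for the adjacent differences).
import Mathlib
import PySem

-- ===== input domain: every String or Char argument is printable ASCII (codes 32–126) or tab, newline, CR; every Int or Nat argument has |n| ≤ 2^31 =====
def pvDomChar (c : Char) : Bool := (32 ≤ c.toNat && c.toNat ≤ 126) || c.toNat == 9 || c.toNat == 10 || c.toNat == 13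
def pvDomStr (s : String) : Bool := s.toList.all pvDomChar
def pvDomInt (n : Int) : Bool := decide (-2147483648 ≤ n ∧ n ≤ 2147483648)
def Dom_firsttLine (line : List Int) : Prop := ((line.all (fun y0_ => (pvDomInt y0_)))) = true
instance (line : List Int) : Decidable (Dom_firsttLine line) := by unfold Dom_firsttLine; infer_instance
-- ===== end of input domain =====

-- B replaces A's forward-accumulate-then-reverse loop by a recursion on the difference list that
-- emits the answer already reversed; equivalence is proved on the inputs where A returns.

-- ===== PORT A =====
-- literal port of soustractlevel: foldl over range(len-1), appending mylist[i+1]-mylist[i]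
-- (indices are always in range in Python, so getD is exact here)
def soustractlevel (mylist : List Int) : List Int :=
  (List.range (mylist.length - 1)).foldl
    (fun newlist i => newlist ++ [mylist.getD (i + 1) 0 - mylist.getD i 0]) []

-- the while loop; fuel = line.length + 1 always suffices (each pass shortens the level by one)
def firsttLineLoop : Nat → List Int → List Int → List Int
  | 0, _, acc => acc
  | fuel + 1, cur, acc =>
    if cur.all (fun e => e == 0) then acc
    else firsttLineLoop fuel (soustractlevel cur)
           (acc ++ [(soustractlevel cur).getD 0 0])

def firsttLine (line : List Int) : List Int :=
  (firsttLineLoop (line.length + 1) line [line.getD 0 0]).reverse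

-- ===== PORT B =====
-- Source B's zip comprehension
def soustractlevel_alt (mylist : List Int) : List Int :=
  (mylist.zip mylist.tail).map (fun p => p.2 - p.1)

lemma soustractlevel_alt_length_lt (l : List Int) (h : l ≠ []) :
    (soustractlevel_alt l).length < l.length := by
  cases l with
  | nil => exact absurd rfl h
  | cons a t =>
      simp [soustractlevel_alt]

def firsttLine_alt (line : List Int) : List Int :=
  if h : line.all (fun e => e == 0) = true then [line.getD 0 0]
  else firsttLine_alt (soustractlevel_alt line) ++ [line.getD 0 0]
termination_by line.length
decreasing_by exact soustractlevel_alt_length_lt line (by rintro rfl; simp at h)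

-- ===== PRECONDITION & SPEC =====
-- Pre_ excludes exactly the inputs on which the Python A raises IndexError: the empty list
-- (line[0] fails) and the lists whose iterated adjacent-difference triangle never reaches an
-- all-zero row, i.e. whose signed binomial alternating sum is non-zero (there the loop reaches a
-- non-zero singleton, differences it to [] and indexes it).  B raises there too.
def Pre_firsttLine (line : List Int) : Prop :=
  line ≠ [] ∧
    (∑ i ∈ Finset.range line.length,
      (-1 : Int) ^ (line.length - 1 + i) * (Nat.choose (line.length - 1) i) * line.getD i 0) = 0
instance (line : List Int) : Decidable (Pre_firsttLine line) := by unfold Pre_firsttLine; infer_instance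

def pvWitness_firsttLine : List Int := [1, 2, 3]

def Spec_firsttLine (line : List Int) (out : List Int) : Prop := out = firsttLine_alt line
instance (line : List Int) (out : List Int) : Decidable (Spec_firsttLine line out) := by unfold Spec_firsttLine; infer_instance

-- ===== CLAIM (what is proved, stated in full; the proofs are below) =====
def Claim_equal_firsttLine : Prop := ∀ (line : List Int), Dom_firsttLine line → Pre_firsttLine line → Spec_firsttLine line (firsttLine line)

-- ===== LEMMAS AND PROOFS =====

-- the canonical difference list both soustractlevel helpers compute
def difM (l : List Int) : List Int :=
  (List.range (l.length - 1)).map (fun i => l.getD (i + 1) 0 - l.getD i 0)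

lemma foldl_append_map (g : Nat → Int) (r : List Nat) (acc : List Int) :
    r.foldl (fun a i => a ++ [g i]) acc = acc ++ r.map g := by
  induction r generalizing acc with
  | nil => simp
  | cons x t ih => simp [ih]

lemma soustract_eq_M (l : List Int) : soustractlevel l = difM l := by
  rw [soustractlevel, foldl_append_map]
  simp [difM]

lemma soustract_alt_eq_M (l : List Int) : soustractlevel_alt l = difM l := by
  apply List.ext_getElem
  · simp [soustractlevel_alt, difM]
  · intro i h1 h2
    simp only [soustractlevel_alt, difM, List.getElem_map, List.getElem_zip, List.getElem_tail,
      List.getElem_range]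
    have hi : i < l.length := by simp [soustractlevel_alt] at h1; omega
    have hi1 : i + 1 < l.length := by simp [soustractlevel_alt] at h1; omega
    rw [List.getD_eq_getElem _ _ hi1, List.getD_eq_getElem _ _ hi]

lemma difM_length (l : List Int) : (difM l).length = l.length - 1 := by simp [difM]

lemma difM_getD (l : List Int) (j : Nat) (hj : j < l.length - 1) :
    (difM l).getD j 0 = l.getD (j + 1) 0 - l.getD j 0 := by
  rw [difM, List.getD_eq_getElem]
  · simp
  · simpa using hj

-- the signed alternating binomial sum of Pre_, as a function
def altsum (l : List Int) : Int :=
  ∑ i ∈ Finset.range l.length,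
    (-1 : Int) ^ (l.length - 1 + i) * (Nat.choose (l.length - 1) i) * l.getD i 0

-- the alternating sum is invariant under one difference step (Pascal's rule)
lemma altsum_inv (l : List Int) (h : 2 ≤ l.length) : altsum (difM l) = altsum l := by
  obtain ⟨m, hm⟩ : ∃ m, l.length = m + 2 := ⟨l.length - 2, by omega⟩
  have hdl : (difM l).length = m + 1 := by rw [difM_length, hm]; omega
  have hget : ∀ j ∈ Finset.range (m + 1), (-1:Int)^(m+j) * (Nat.choose m j) * (difM l).getD j 0
      = (-1:Int)^(m+j) * (Nat.choose m j) * (l.getD (j+1) 0 - l.getD j 0) := by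
    intro j hj
    rw [difM_getD l j (by simp at hj; omega)]
  rw [altsum, altsum, hdl, hm]
  have e1 : m + 1 - 1 = m := rfl
  have e2 : m + 2 - 1 = m + 1 := rfl
  have e3 : m + 2 = m + 1 + 1 := rfl
  rw [e1, e2, e3]
  rw [Finset.sum_congr rfl hget]
  have pascal : ∀ j : Nat, (Nat.choose (m+1) (j+1) : Int) = Nat.choose m j + Nat.choose m (j+1) := by
    intro j; rw [Nat.choose_succ_succ]; push_cast; ring
  rw [Finset.sum_range_succ' (fun i => (-1:Int)^(m+1+i) * (Nat.choose (m+1) i) * l.getD i 0) (m+1)]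
  have expand : ∀ j ∈ Finset.range (m+1),
      (-1:Int)^(m+1+(j+1)) * (Nat.choose (m+1) (j+1)) * l.getD (j+1) 0
      = (-1:Int)^(m+j) * (Nat.choose m j) * l.getD (j+1) 0
        + (-1:Int)^(m+j) * (Nat.choose m (j+1)) * l.getD (j+1) 0 := by
    intro j hj
    rw [pascal j]
    have hp : (-1:Int)^(m+1+(j+1)) = (-1:Int)^(m+j) := by
      rw [show m+1+(j+1) = (m+j) + 2 by ring, pow_add]; ring
    rw [hp]; ring
  rw [Finset.sum_congr rfl expand, Finset.sum_add_distrib]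
  have lhs : ∀ j ∈ Finset.range (m+1),
      (-1:Int)^(m+j) * (Nat.choose m j) * (l.getD (j+1) 0 - l.getD j 0)
      = (-1:Int)^(m+j) * (Nat.choose m j) * l.getD (j+1) 0
        - (-1:Int)^(m+j) * (Nat.choose m j) * l.getD j 0 := by
    intro j hj; ring
  rw [Finset.sum_congr rfl lhs, Finset.sum_sub_distrib]
  rw [Finset.sum_range_succ' (fun j => (-1:Int)^(m+j) * (Nat.choose m j) * l.getD j 0) m]
  rw [Finset.sum_range_succ (fun j => (-1:Int)^(m+j) * (Nat.choose m (j+1)) * l.getD (j+1) 0) m]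
  simp [Nat.choose_succ_self]
  have sgn : ∀ j : Nat, (-1:Int)^(m+(j+1)) = -(-1:Int)^(m+j) := by
    intro j; rw [show m+(j+1) = (m+j)+1 by ring, pow_succ]; ring
  have flip : ∑ x ∈ Finset.range m, (-1:Int)^(m+(x+1)) * (Nat.choose m (x+1)) * (l[x+1]?.getD 0)
      = -∑ x ∈ Finset.range m, (-1:Int)^(m+x) * (Nat.choose m (x+1)) * (l[x+1]?.getD 0) := by
    rw [← Finset.sum_neg_distrib]
    exact Finset.sum_congr rfl (fun x _ => by rw [sgn x]; ring)
  rw [flip, pow_succ]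
  ring

-- the last row of the difference triangle is the singleton alternating sum
lemma iter_difM_aux : ∀ n (l : List Int), l.length = n + 1 → difM^[n] l = [altsum l] := by
  intro n
  induction n with
  | zero =>
      intro l hl
      match l, hl with
      | [a], _ => simp [altsum]
  | succ n ih =>
      intro l hl
      rw [Function.iterate_succ_apply]
      have hdl : (difM l).length = n + 1 := by rw [difM_length, hl]; omega
      rw [ih (difM l) hdl, altsum_inv l (by omega)]

lemma iter_difM (l : List Int) (h : l ≠ []) : difM^[l.length - 1] l = [altsum l] := by
  have : l.length = (l.length - 1) + 1 := by
    cases l with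
    | nil => exact absurd rfl h
    | cons a t => simp
  exact iter_difM_aux (l.length - 1) l this

-- the loop terminates with an all-zero row somewhere in the triangle
def Good (l : List Int) : Prop :=
  l ≠ [] ∧ ∃ k, k < l.length ∧ (difM^[k] l).all (fun e => e == 0) = true

lemma good_step (l : List Int) (hg : Good l) (hz : l.all (fun e => e == 0) = false) :
    Good (difM l) := by
  obtain ⟨hne, k, hk, hall⟩ := hg
  have hk0 : k ≠ 0 := by
    rintro rfl
    simp only [Function.iterate_zero, id] at hall
    rw [hall] at hz; exact Bool.true_eq_false.mp hz
  have hlen2 : 2 ≤ l.length := by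
    rcases l with _ | ⟨a, _ | ⟨b, t⟩⟩
    · exact absurd rfl hne
    · omega
    · simp
  refine ⟨?_, k - 1, ?_, ?_⟩
  · intro hnil
    have := difM_length l
    rw [hnil] at this
    simp at this; omega
  · rw [difM_length]; omega
  · have : difM^[k - 1] (difM l) = difM^[k] l := by
      rw [← Function.iterate_succ_apply]
      congr 1; omega
    rw [this]; exact hall

lemma pre_good (l : List Int) (h : Pre_firsttLine l) : Good l := by
  obtain ⟨hne, hsum⟩ := h
  refine ⟨hne, l.length - 1, ?_, ?_⟩
  · cases l with
    | nil => exact absurd rfl hne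
    | cons a t => simp
  · rw [iter_difM l hne]
    have : altsum l = 0 := hsum
    rw [this]; rfl

-- B's result always ends with line's head, so its reverse starts with it
lemma alt_last (l : List Int) :
    (firsttLine_alt l).reverse = l.getD 0 0 :: ((firsttLine_alt l).reverse).tail := by
  rw [firsttLine_alt]
  split
  · simp
  · simp

-- loop invariant: A's loop appends exactly the tail of the reverse of B's result
lemma loop_eq (n : Nat) : ∀ l acc fuel, l.length ≤ n → l.length < fuel → Good l →
    firsttLineLoop fuel l acc = acc ++ ((firsttLine_alt l).reverse).tail := by
  induction n with
  | zero =>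
      intro l acc fuel hn hf hg
      exact absurd (List.length_eq_zero_iff.mp (Nat.le_zero.mp hn)) hg.1
  | succ n ih =>
      intro l acc fuel hn hf hg
      obtain ⟨fuel, rfl⟩ : ∃ f, fuel = f + 1 := ⟨fuel - 1, by omega⟩
      by_cases hz : l.all (fun e => e == 0) = true
      · rw [firsttLineLoop, if_pos hz, firsttLine_alt, dif_pos hz]
        simp
      · have hzf : l.all (fun e => e == 0) = false := by
          revert hz; cases l.all (fun e => e == 0) <;> simp
        have hne : l ≠ [] := by
          rintro rfl; simp at hzf
        have hgd : Good (difM l) := good_step l hg hzf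
        have hlen : (difM l).length = l.length - 1 := difM_length l
        have hlen1 : 1 ≤ l.length := by
          cases l with
          | nil => exact absurd rfl hne
          | cons a t => simp
        have halt : firsttLine_alt l = firsttLine_alt (difM l) ++ [l.getD 0 0] := by
          conv_lhs => rw [firsttLine_alt]
          rw [dif_neg hz, soustract_alt_eq_M]
        rw [firsttLineLoop, if_neg hz, soustract_eq_M]
        rw [ih (difM l) (acc ++ [(difM l).getD 0 0]) fuel (by omega) (by omega) hgd]
        rw [halt, List.reverse_append]
        simp only [List.reverse_cons, List.reverse_nil, List.nil_append, List.singleton_append,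
      List.tail_cons]
        rw [alt_last (difM l)]
        simp

-- ===== VERDICT (by name: the statement is the Claim_ definition above) =====
theorem firsttLine_spec : Claim_equal_firsttLine := by
  intro line _ hpre
  have hg := pre_good line hpre
  unfold Spec_firsttLine firsttLine
  rw [loop_eq line.length line [line.getD 0 0] (line.length + 1) le_rfl (Nat.lt_succ_self _) hg]
  have h := alt_last line
  calc ([line.getD 0 0] ++ ((firsttLine_alt line).reverse).tail).reverse
      = ((firsttLine_alt line).reverse).reverse := by rw [h]; simp
    _ = firsttLine_alt line := by simp
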